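-- pv_equiv track=rewrite | github.com/mostgood1/NHL-Betting | nhl_betting/data/odds_api.py | _pick_bookmaker
-- ===== SOURCE A (Python) =====
-- from typing import Dict, List, Optional, Tuple
--
-- BOOKMAKER_PRIORITY = [
--     "pinnacle",
--     "fanduel",
--     "draftkings",
--     "betmgm",
--     "caesars",
--     "pointsbetus",
--     "betonlineag",
--     "bovada",
--     "unibet",
--     "betrivers",
--     "sugarhouse",
--     "barstool",
-- ]
--
-- def _pick_bookmaker(bookmakers: List[Dict], preferred: Optional[str]) -> Optional[Dict]:
--     if not bookmakers:
--         return None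
--     if preferred and any(b.get("key") == preferred for b in bookmakers):
--         return next(b for b in bookmakers if b.get("key") == preferred)
--     for bk in BOOKMAKER_PRIORITY:
--         for b in bookmakers:
--             if b.get("key") == bk:
--                 return b
--     return bookmakers[0]
-- ===== SOURCE B (Python) =====
-- from typing import Dict, List, Optional
--
-- BOOKMAKER_PRIORITY = [
--     "pinnacle",
--     "fanduel",
--     "draftkings",
--     "betmgm",
--     "caesars",
--     "pointsbetus",
--     "betonlineag",
--     "bovada",
--     "unibet",
--     "betrivers",
--     "sugarhouse",
--     "barstool",
-- ]
--
-- _PRIORITY_INDEX = {k: i for i, k in enumerate(BOOKMAKER_PRIORITY)}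
--
--
-- def _pick_bookmaker(bookmakers: List[Dict], preferred: Optional[str]) -> Optional[Dict]:
--     if not bookmakers:
--         return None
--     big = len(BOOKMAKER_PRIORITY)
--
--     def rank(b):
--         k = b.get("key")
--         if preferred and k == preferred:
--             return -1
--         return _PRIORITY_INDEX.get(k, big)
--
--     return min(bookmakers, key=rank)
-- ===== Notes on version B (the rewrite author's own statement) =====
-- stated objective: simpler
-- what changed: Replaces the preferred-key membership test plus the nested priority-list-by-bookmaker scan with a precomputed key-to-priority-index dict and a single min(bookmakers, key=rank) pass whose rank is -1 for the preferred key, the priority index if known, else len(BOOKMAKER_PRIORITY); min's first-minimum stability reproduces A's first-match and bookmakers[0] fallback behaviour exactly.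
import Mathlib
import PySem

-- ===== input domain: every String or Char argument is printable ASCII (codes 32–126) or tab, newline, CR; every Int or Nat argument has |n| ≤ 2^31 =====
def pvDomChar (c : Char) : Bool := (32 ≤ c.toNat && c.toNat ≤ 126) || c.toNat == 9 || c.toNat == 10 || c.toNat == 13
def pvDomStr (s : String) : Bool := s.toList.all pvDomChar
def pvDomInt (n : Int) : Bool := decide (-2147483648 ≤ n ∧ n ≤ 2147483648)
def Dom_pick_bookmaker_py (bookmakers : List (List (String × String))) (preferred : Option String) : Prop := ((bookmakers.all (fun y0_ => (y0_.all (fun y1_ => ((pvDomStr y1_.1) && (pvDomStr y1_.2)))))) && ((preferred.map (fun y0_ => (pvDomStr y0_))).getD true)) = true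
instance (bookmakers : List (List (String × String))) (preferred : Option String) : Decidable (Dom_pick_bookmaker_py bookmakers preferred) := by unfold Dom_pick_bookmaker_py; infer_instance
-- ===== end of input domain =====

-- B replaces A's preferred-check plus nested priority scan by one rank-based min pass
-- over the bookmakers (objective: simpler).

-- ===== PORT A =====
def pvPriority : List String :=
  ["pinnacle", "fanduel", "draftkings", "betmgm", "caesars", "pointsbetus",
   "betonlineag", "bovada", "unibet", "betrivers", "sugarhouse", "barstool"]

-- the nested 'for bk in BOOKMAKER_PRIORITY: for b in bookmakers: …' loop of A
def pvScan : List String → List (List (String × String)) → Option (List (String × String))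
  | [], _ => none
  | p :: ps, bks =>
    match bks.find? (fun b => (PySem.Dict.mk b).get? "key" == some p) with
    | some b => some b
    | none => pvScan ps bks

def pick_bookmaker_py (bookmakers : List (List (String × String))) (preferred : Option String) : Option (List (String × String)) :=
  if bookmakers = [] then none
  else
    let fallback :=
      match pvScan pvPriority bookmakers with
      | some b => some b
      | none => PySem.List.pyGet? bookmakers 0
    match preferred with
    | none => fallback
    | some p =>
      if (p ≠ "") ∧ bookmakers.any (fun b => (PySem.Dict.mk b).get? "key" == some p) then
        match bookmakers.find? (fun b => (PySem.Dict.mk b).get? "key" == some p) with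
        | some b => some b
        | none => none          -- unreachable: guarded by 'any' (Python's next(...))
      else fallback

-- ===== PORT B =====
-- _PRIORITY_INDEX = {k: i for i, k in enumerate(BOOKMAKER_PRIORITY)}
def pvPrioIndex : PySem.Dict String Int :=
  (PySem.List.enumerate pvPriority 0).foldl (fun d ik => d.insert ik.2 ik.1) PySem.Dict.empty

def pvRank (preferred : Option String) (b : List (String × String)) : Int :=
  let k := (PySem.Dict.mk b).get? "key"
  let prefMatch : Bool :=
    match preferred with
    | some p => !(p == "") && (k == some p)   -- 'preferred and k == preferred'
    | none => false
  if prefMatch then -1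
  else
    match k with
    | some s => pvPrioIndex.getD s (pvPriority.length : Int)
    | none => (pvPriority.length : Int)       -- _PRIORITY_INDEX.get(None, big) = big

def pick_bookmaker_py_alt (bookmakers : List (List (String × String))) (preferred : Option String) : Option (List (String × String)) :=
  if bookmakers = [] then none
  else PySem.List.min? bookmakers (pvRank preferred)

-- ===== PRECONDITION & SPEC =====
def Spec_pick_bookmaker_py (bookmakers : List (List (String × String))) (preferred : Option String) (out : Option (List (String × String))) : Prop := out = pick_bookmaker_py_alt bookmakers preferred
instance (bookmakers : List (List (String × String))) (preferred : Option String) (out : Option (List (String × String))) : Decidable (Spec_pick_bookmaker_py bookmakers preferred out) := by unfold Spec_pick_bookmaker_py; infer_instance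

-- ===== CLAIM (what is proved, stated in full; the proofs are below) =====
def Claim_equal_pick_bookmaker_py : Prop := ∀ (bookmakers : List (List (String × String))) (preferred : Option String), Dom_pick_bookmaker_py bookmakers preferred → Spec_pick_bookmaker_py bookmakers preferred (pick_bookmaker_py bookmakers preferred)

-- ===== LEMMAS AND PROOFS =====

-- rank of a key in a priority list: its first index, or the list's length if absent
def pvRankIn : List String → Option String → Int
  | [], _ => 0
  | p :: ps, k => if k = some p then 0 else 1 + pvRankIn ps k

theorem pvRankIn_nonneg (ps : List String) (k : Option String) : 0 ≤ pvRankIn ps k := by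
  induction ps with
  | nil => simp [pvRankIn]
  | cons p ps ih => simp only [pvRankIn]; split <;> omega

set_option maxHeartbeats 1000000 in
theorem pvPrioIndex_getD (s : String) :
    pvPrioIndex.getD s (pvPriority.length : Int) = pvRankIn pvPriority (some s) := by
  have h : pvPrioIndex = PySem.Dict.mk
      [("pinnacle", 0), ("fanduel", 1), ("draftkings", 2), ("betmgm", 3), ("caesars", 4),
       ("pointsbetus", 5), ("betonlineag", 6), ("bovada", 7), ("unibet", 8), ("betrivers", 9),
       ("sugarhouse", 10), ("barstool", 11)] := rfl
  rw [h]
  have hnil : (PySem.Dict.mk ([] : List (String × Int))).get? s = none := rfl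
  simp only [PySem.Dict.getD, PySem.Dict.get?_mk_cons, hnil]
  split_ifs with h1 h2 h3 h4 h5 h6 h7 h8 h9 h10 h11 h12 <;>
    simp_all only [beq_iff_eq] <;> subst_vars <;> first
      | decide
      | (simp only [pvRankIn, pvPriority, Option.some.injEq]
         rw [if_neg (fun hc => h1 hc.symm), if_neg (fun hc => h2 hc.symm),
             if_neg (fun hc => h3 hc.symm), if_neg (fun hc => h4 hc.symm),
             if_neg (fun hc => h5 hc.symm), if_neg (fun hc => h6 hc.symm),
             if_neg (fun hc => h7 hc.symm), if_neg (fun hc => h8 hc.symm),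
             if_neg (fun hc => h9 hc.symm), if_neg (fun hc => h10 hc.symm),
             if_neg (fun hc => h11 hc.symm), if_neg (fun hc => h12 hc.symm)]
         decide)

theorem pvRankAux_eq (k : Option String) :
    (match k with
     | some s => pvPrioIndex.getD s (pvPriority.length : Int)
     | none => (pvPriority.length : Int)) = pvRankIn pvPriority k := by
  cases k with
  | none => decide
  | some s => exact pvPrioIndex_getD s

theorem pvRank_of_not_pref (preferred : Option String) (b : List (String × String))
    (h : ¬ ((match preferred with
             | some p => !(p == "") && ((PySem.Dict.mk b).get? "key" == some p)
             | none => false) = true)) :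
    pvRank preferred b = pvRankIn pvPriority ((PySem.Dict.mk b).get? "key") := by
  simp only [pvRank]
  rw [if_neg h]
  exact pvRankAux_eq _

-- the foldl step used by PySem.List.min?
def pvStep {α : Type} (key : α → Int) (acc : Option α) (x : α) : Option α :=
  match acc with
  | none => some x
  | some m => if key x < key m then some x else some m

theorem min?_eq_foldl {α : Type} (xs : List α) (key : α → Int) :
    PySem.List.min? xs key = xs.foldl (pvStep key) none := rfl

theorem foldl_step_stay {α : Type} (key : α → Int) (t : List α) (m : α)
    (h : ∀ y ∈ t, key m ≤ key y) : t.foldl (pvStep key) (some m) = some m := by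
  induction t with
  | nil => rfl
  | cons y t ih =>
    have h1 : ¬ key y < key m := by have := h y (by simp); omega
    simp only [List.foldl_cons, pvStep, if_neg h1]
    exact ih (fun z hz => h z (by simp [hz]))

-- min? only looks at the key on members: pointwise-equal-on-members keys give equal min?
theorem foldl_min_congr {α : Type} (k1 k2 : α → Int) (t : List α) :
    ∀ (m : α), k1 m = k2 m → (∀ y ∈ t, k1 y = k2 y) →
    t.foldl (pvStep k1) (some m) = t.foldl (pvStep k2) (some m) := by
  induction t with
  | nil => intros; rfl
  | cons y t ih =>
    intro m hm hall
    have hy := hall y (by simp)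
    simp only [List.foldl_cons, pvStep, hy, hm]
    split
    · exact ih y hy (fun z hz => hall z (by simp [hz]))
    · exact ih m hm (fun z hz => hall z (by simp [hz]))

theorem min?_congr_mem {α : Type} (k1 k2 : α → Int) (xs : List α)
    (h : ∀ x ∈ xs, k1 x = k2 x) : PySem.List.min? xs k1 = PySem.List.min? xs k2 := by
  cases xs with
  | nil => rfl
  | cons x t =>
    rw [min?_eq_foldl, min?_eq_foldl]
    simp only [List.foldl_cons, pvStep]
    exact foldl_min_congr k1 k2 t x (h x (by simp)) (fun z hz => h z (by simp [hz]))

-- with a known least value v present, min? is the FIRST element whose key is v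
theorem min?_eq_find {α : Type} (key : α → Int) (v : Int) :
    ∀ (xs : List α), (∀ x ∈ xs, v ≤ key x) → (∃ x ∈ xs, key x = v) →
    PySem.List.min? xs key = xs.find? (fun x => key x == v) := by
  have aux : ∀ (t : List α) (m : α), (∀ y ∈ t, v ≤ key y) → (∃ y ∈ t, key y = v) →
      v < key m → t.foldl (pvStep key) (some m) = t.find? (fun x => key x == v) := by
    intro t
    induction t with
    | nil => intro m _ hex _; obtain ⟨y, hy, _⟩ := hex; simp at hy
    | cons y t ih =>
      intro m hall hex hm
      by_cases hy : key y = v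
      · have hlt : key y < key m := by omega
        rw [List.find?_cons_of_pos (by simp [hy])]
        simp only [List.foldl_cons, pvStep, if_pos hlt]
        exact foldl_step_stay key t y (fun z hz => hy ▸ hall z (by simp [hz]))
      · have hyv : v < key y := by have := hall y (by simp); omega
        have hex' : ∃ z ∈ t, key z = v := by
          obtain ⟨z, hz, hzv⟩ := hex
          rcases List.mem_cons.mp hz with h | h
          · exact absurd (h ▸ hzv) hy
          · exact ⟨z, h, hzv⟩
        rw [List.find?_cons_of_neg (by simp [hy])]
        simp only [List.foldl_cons, pvStep]
        split
        · exact ih y (fun z hz => hall z (by simp [hz])) hex' hyv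
        · exact ih m (fun z hz => hall z (by simp [hz])) hex' hm
  intro xs hall hex
  cases xs with
  | nil => obtain ⟨y, hy, _⟩ := hex; simp at hy
  | cons x t =>
    rw [min?_eq_foldl]
    by_cases hx : key x = v
    · rw [List.find?_cons_of_pos (by simp [hx])]
      simp only [List.foldl_cons, pvStep]
      exact foldl_step_stay key t x (fun z hz => hx ▸ hall z (by simp [hz]))
    · have hxv : v < key x := by have := hall x (by simp); omega
      have hex' : ∃ z ∈ t, key z = v := by
        obtain ⟨z, hz, hzv⟩ := hex
        rcases List.mem_cons.mp hz with h | h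
        · exact absurd (h ▸ hzv) hx
        · exact ⟨z, h, hzv⟩
      rw [List.find?_cons_of_neg (by simp [hx])]
      simp only [List.foldl_cons, pvStep]
      exact aux t x (fun z hz => hall z (by simp [hz])) hex' hxv

-- shifting every key by +1 does not change which element is minimal first
theorem min?_shift {α : Type} (xs : List α) (key : α → Int) :
    PySem.List.min? xs (fun x => 1 + key x) = PySem.List.min? xs key := by
  rw [min?_eq_foldl, min?_eq_foldl]
  apply PySem.List.foldl_congr_mem
  intro acc x _
  cases acc with
  | none => rfl
  | some m =>
    simp only [pvStep]
    by_cases h : key x < key m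
    · rw [if_pos (by omega : (1:Int) + key x < 1 + key m), if_pos h]
    · rw [if_neg (by omega : ¬ (1:Int) + key x < 1 + key m), if_neg h]

-- A's priority scan (with the bookmakers[0] fallback) IS the first rank-minimising element
theorem pvScan_min (ps : List String) (x : List (String × String))
    (t : List (List (String × String))) :
    (match pvScan ps (x :: t) with
     | some b => some b
     | none => PySem.List.pyGet? (x :: t) 0) =
    PySem.List.min? (x :: t) (fun b => pvRankIn ps ((PySem.Dict.mk b).get? "key")) := by
  induction ps with
  | nil =>
    simp only [pvScan]
    have h0 : PySem.List.pyGet? (x :: t) 0 = some x := by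
      simp [PySem.List.pyGet?, PySem.List.pyIdx?]
    rw [h0, min?_eq_foldl]
    simp only [List.foldl_cons, pvStep]
    exact (foldl_step_stay _ t x (fun y _ => le_refl 0)).symm
  | cons p ps ih =>
    simp only [pvScan]
    by_cases hex : ∃ b ∈ (x :: t), ((PySem.Dict.mk b).get? "key") = some p
    · -- some bookmaker carries key p: both sides return the first one
      have hall : ∀ b ∈ (x :: t), (0 : Int) ≤ pvRankIn (p :: ps) ((PySem.Dict.mk b).get? "key") :=
        fun b _ => pvRankIn_nonneg _ _
      have hex0 : ∃ b ∈ (x :: t), pvRankIn (p :: ps) ((PySem.Dict.mk b).get? "key") = 0 := by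
        obtain ⟨b, hb, hk⟩ := hex
        exact ⟨b, hb, by simp [pvRankIn, hk]⟩
      rw [min?_eq_find _ 0 _ hall hex0]
      have hfun : (fun b => pvRankIn (p :: ps) ((PySem.Dict.mk b).get? "key") == (0:Int)) =
          (fun b => (PySem.Dict.mk b).get? "key" == some p) := by
        funext b
        by_cases hk : (PySem.Dict.mk b).get? "key" = some p
        · simp [pvRankIn, hk]
        · have hge := pvRankIn_nonneg ps ((PySem.Dict.mk b).get? "key")
          simp only [pvRankIn, if_neg hk]
          simp [hk]
          omega
      rw [hfun]
      obtain ⟨b, hb, hk⟩ := hex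
      have : ∃ c, (x :: t).find? (fun b => (PySem.Dict.mk b).get? "key" == some p) = some c := by
        rcases hfind : (x :: t).find? (fun b => (PySem.Dict.mk b).get? "key" == some p) with _ | c
        · exact absurd (by simp [hk]) (List.find?_eq_none.mp hfind b hb)
        · exact ⟨c, rfl⟩
      obtain ⟨c, hc⟩ := this
      rw [hc]
    · -- no bookmaker carries key p: A moves to the next priority, B's ranks all shift by 1
      have hnone : (x :: t).find? (fun b => (PySem.Dict.mk b).get? "key" == some p) = none := by
        rw [List.find?_eq_none]
        intro b hb
        simp only [beq_iff_eq]
        exact fun h => hex ⟨b, hb, h⟩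
      rw [hnone]
      have hcongr : PySem.List.min? (x :: t) (fun b => pvRankIn (p :: ps) ((PySem.Dict.mk b).get? "key")) =
          PySem.List.min? (x :: t) (fun b => 1 + pvRankIn ps ((PySem.Dict.mk b).get? "key")) := by
        apply min?_congr_mem
        intro b hb
        have hk : ((PySem.Dict.mk b).get? "key") ≠ some p := fun h => hex ⟨b, hb, h⟩
        simp only [pvRankIn, if_neg hk]
      rw [hcongr, min?_shift]
      exact ih

-- ===== VERDICT (by name: the statement is the Claim_ definition above) =====
theorem pick_bookmaker_py_spec : Claim_equal_pick_bookmaker_py := by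
  intro bookmakers preferred _
  unfold Spec_pick_bookmaker_py
  cases bookmakers with
  | nil => simp [pick_bookmaker_py, pick_bookmaker_py_alt]
  | cons x t =>
    cases preferred with
    | none =>
      simp only [pick_bookmaker_py, pick_bookmaker_py_alt, if_neg (List.cons_ne_nil x t)]
      rw [show PySem.List.min? (x :: t) (pvRank none) =
          PySem.List.min? (x :: t) (fun b => pvRankIn pvPriority ((PySem.Dict.mk b).get? "key"))
        from min?_congr_mem _ _ _ (fun b _ => pvRank_of_not_pref none b (by simp))]
      exact pvScan_min pvPriority x t
    | some p =>
      simp only [pick_bookmaker_py, pick_bookmaker_py_alt, if_neg (List.cons_ne_nil x t)]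
      by_cases hgrd : p ≠ "" ∧ ((x :: t).any fun b => (PySem.Dict.mk b).get? "key" == some p) = true
      · -- preferred branch fires: A takes next(...), B's rank -1 singles out the same element
        obtain ⟨hpne, hany⟩ := hgrd
        obtain ⟨b0, hb0, hk0b⟩ := List.any_eq_true.mp hany
        have hk0 : (PySem.Dict.mk b0).get? "key" = some p := by simpa using hk0b
        rw [if_pos ⟨hpne, hany⟩]
        have hall : ∀ b ∈ (x :: t), (-1 : Int) ≤ pvRank (some p) b := by
          intro b _
          simp only [pvRank]
          split
          · omega
          · rw [pvRankAux_eq]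
            have := pvRankIn_nonneg pvPriority ((PySem.Dict.mk b).get? "key")
            omega
        have hexm : ∃ b ∈ (x :: t), pvRank (some p) b = -1 := by
          refine ⟨b0, hb0, ?_⟩
          simp only [pvRank]
          rw [if_pos (by simp [hk0, hpne])]
        rw [min?_eq_find _ (-1) _ hall hexm]
        have hfun : (fun b => pvRank (some p) b == (-1 : Int)) =
            (fun b => (PySem.Dict.mk b).get? "key" == some p) := by
          funext b
          by_cases hk : (PySem.Dict.mk b).get? "key" = some p
          · simp only [pvRank]
            rw [if_pos (by simp [hk, hpne])]
            simp [hk]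
          · simp only [pvRank]
            rw [if_neg (by simp [hk])]
            rw [pvRankAux_eq]
            have hge := pvRankIn_nonneg pvPriority ((PySem.Dict.mk b).get? "key")
            simp [hk]
            omega
        rw [hfun]
        have : ∃ c, (x :: t).find? (fun b => (PySem.Dict.mk b).get? "key" == some p) = some c := by
          rcases hfind : (x :: t).find? (fun b => (PySem.Dict.mk b).get? "key" == some p) with _ | c
          · exact absurd (by simp [hk0]) (List.find?_eq_none.mp hfind b0 hb0)
          · exact ⟨c, rfl⟩
        obtain ⟨c, hc⟩ := this
        rw [hc]
      · -- preferred branch does not fire: no member can have the -1 rank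
        rw [if_neg hgrd]
        have hnm : ∀ b ∈ (x :: t),
            pvRank (some p) b = pvRankIn pvPriority ((PySem.Dict.mk b).get? "key") := by
          intro b hb
          apply pvRank_of_not_pref
          simp only [Bool.and_eq_true, Bool.not_eq_true', beq_iff_eq, not_and]
          intro hpne hkeq
          apply hgrd
          refine ⟨by simpa using hpne, ?_⟩
          rw [List.any_eq_true]
          exact ⟨b, hb, by simp [hkeq]⟩
        rw [min?_congr_mem _ _ _ hnm]
        exact pvScan_min pvPriority x t
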